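-- pv_equiv track=rewrite | github.com/franq22/Teoria-de-la-informacion | utils.py | generar_combinaciones
-- ===== SOURCE A (Python) =====
-- def generar_combinaciones(alfabeto: list, N: int) -> list:
--     if N == 1:
--         return [[letra] for letra in alfabeto]
--     else:
--         combinaciones_previas = generar_combinaciones(alfabeto, N - 1)
--         nuevas_combinaciones = []
--         for combinacion in combinaciones_previas:
--             for letra in alfabeto:
--                 nuevas_combinaciones.append(combinacion + [letra])
--         return nuevas_combinaciones
-- ===== SOURCE B (Python) =====
-- def generar_combinaciones(alfabeto: list, N: int) -> list:
--     combinaciones = [[letra] for letra in alfabeto]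
--     for _ in range(N - 1):
--         combinaciones = [c + [letra] for c in combinaciones for letra in alfabeto]
--     return combinaciones
-- ===== Notes on version B (the rewrite author's own statement) =====
-- stated objective: simpler
-- what changed: Replaces top-down recursion on N with an iterative bottom-up loop that rebuilds the combination list N-1 times via a comprehension.
import Mathlib
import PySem

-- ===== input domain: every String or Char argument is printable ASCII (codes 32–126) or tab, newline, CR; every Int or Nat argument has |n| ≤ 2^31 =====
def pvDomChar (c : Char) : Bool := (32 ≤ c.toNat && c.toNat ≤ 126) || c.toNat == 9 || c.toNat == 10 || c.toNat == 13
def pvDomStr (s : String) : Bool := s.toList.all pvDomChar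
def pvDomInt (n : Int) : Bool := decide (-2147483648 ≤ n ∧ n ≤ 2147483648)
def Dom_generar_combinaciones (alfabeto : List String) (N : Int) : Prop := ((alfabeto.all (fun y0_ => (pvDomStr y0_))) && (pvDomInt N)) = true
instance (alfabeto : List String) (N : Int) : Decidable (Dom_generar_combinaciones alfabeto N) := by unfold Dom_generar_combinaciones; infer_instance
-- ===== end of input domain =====

-- B replaces A's top-down recursion on N with an iterative bottom-up rebuild loop (objective: simpler).


-- ===== PORT A =====
-- fuel = N.toNat makes A's recursion total; for N ≤ 0 Python diverges (excluded by Pre_)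
def generarFuel (alfabeto : List String) : Nat → List (List String)
  | 0 => []
  | 1 => alfabeto.map (fun letra => [letra])
  | n+2 =>
      let combinaciones_previas := generarFuel alfabeto (n+1)
      combinaciones_previas.foldl
        (fun nuevas combinacion =>
          alfabeto.foldl (fun nuevas2 letra => nuevas2 ++ [combinacion ++ [letra]]) nuevas) []

def generar_combinaciones (alfabeto : List String) (N : Int) : List (List String) :=
  generarFuel alfabeto N.toNat

-- ===== PORT B =====
def generar_combinaciones_alt (alfabeto : List String) (N : Int) : List (List String) :=
  (List.range (N - 1).toNat).foldl
    (fun combinaciones _ =>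
      combinaciones.flatMap (fun c => alfabeto.map (fun letra => c ++ [letra])))
    (alfabeto.map (fun letra => [letra]))

-- ===== PRECONDITION & SPEC =====
-- Pre_ excludes N ≤ 0, on which Python A recurses forever (RecursionError)
def Pre_generar_combinaciones (alfabeto : List String) (N : Int) : Prop := 1 ≤ N
instance (alfabeto : List String) (N : Int) : Decidable (Pre_generar_combinaciones alfabeto N) := by unfold Pre_generar_combinaciones; infer_instance
def pvWitness_generar_combinaciones : List String × Int := (["a", "b"], 2)

def Spec_generar_combinaciones (alfabeto : List String) (N : Int) (out : List (List String)) : Prop := out = generar_combinaciones_alt alfabeto N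
instance (alfabeto : List String) (N : Int) (out : List (List String)) : Decidable (Spec_generar_combinaciones alfabeto N out) := by unfold Spec_generar_combinaciones; infer_instance

-- ===== CLAIM =====
def Claim_equal_generar_combinaciones : Prop := ∀ (alfabeto : List String) (N : Int), Dom_generar_combinaciones alfabeto N → Pre_generar_combinaciones alfabeto N → Spec_generar_combinaciones alfabeto N (generar_combinaciones alfabeto N)

-- ===== LEMMAS AND PROOFS =====
theorem generarFuel_eq_iter (alfabeto : List String) (n : Nat) :
    generarFuel alfabeto (n + 1) =
    (List.range n).foldl
      (fun combinaciones _ =>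
        combinaciones.flatMap (fun c => alfabeto.map (fun letra => c ++ [letra])))
      (alfabeto.map (fun letra => [letra])) := by
  induction n with
  | zero => rfl
  | succ n ih =>
      show (generarFuel alfabeto (n+1)).foldl
            (fun nuevas combinacion =>
              alfabeto.foldl (fun nuevas2 letra => nuevas2 ++ [combinacion ++ [letra]]) nuevas) [] = _
      rw [List.range_succ, List.foldl_append, ← ih]
      simp only [PySem.List.foldl_append_singleton_eq_map, PySem.List.foldl_append_eq_flatMap,
        List.nil_append, List.flatMap, List.foldl_cons, List.foldl_nil]

-- ===== VERDICT =====
theorem generar_combinaciones_spec : Claim_equal_generar_combinaciones := by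
  intro alfabeto N _ hpre
  unfold Spec_generar_combinaciones generar_combinaciones generar_combinaciones_alt
  have h1 : N.toNat = (N - 1).toNat + 1 := by
    unfold Pre_generar_combinaciones at hpre; omega
  rw [h1, generarFuel_eq_iter]
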